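-- pv_equiv track=rewrite | github.com/c0ntradicti0n/self-reading-library | python/language/transformer/core/xnym_embeddings/dict_tools.py | dict_compare
-- ===== SOURCE A (Python) =====
-- def dict_compare(d1, d2, ignore_order=False):
--     d1_keys = set(d1.keys())
--     d2_keys = set(d2.keys())
--     intersect_keys = d1_keys.intersection(d2_keys)
--     added = d1_keys - d2_keys
--     removed = d2_keys - d1_keys
--     modified = {o : (d1[o], d2[o]) for o in intersect_keys if d1[o] != d2[o]}
--     if ignore_order:
--         modified = {o : (d1[o], d2[o]) for o in intersect_keys
--                     if set(d1[o]) != set(d2[o])}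
--
--     same = set(o for o in intersect_keys if d1[o] == d2[o])
--     return added, removed, modified, same
-- ===== SOURCE B (Python) =====
-- def dict_compare(d1, d2, ignore_order=False):
--     # Build a full outer join of the two dicts first (key -> (value-in-d1, value-in-d2),
--     # with MISSING marking an absent side), then classify each joined row by which side
--     # is missing -- no membership tests against d1/d2 in the classification.
--     MISSING = object()
--     merged = {k: (v, MISSING) for k, v in d1.items()}
--     for k, v in d2.items():
--         merged[k] = (merged[k][0], v) if k in merged else (MISSING, v)
--     added, removed, same = set(), set(), set()
--     modified = {}
--     for k, (v1, v2) in merged.items():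
--         if v2 is MISSING:
--             added.add(k)
--         elif v1 is MISSING:
--             removed.add(k)
--         else:
--             if (set(v1) != set(v2)) if ignore_order else (v1 != v2):
--                 modified[k] = (v1, v2)
--             if v1 == v2:
--                 same.add(k)
--     return added, removed, modified, same
-- ===== Notes on version B (the rewrite author's own statement) =====
-- stated objective: alternative
-- what changed: Instead of key-set algebra with comprehensions, B first builds a single full-outer-join dict mapping each key to its (d1-value, d2-value) pair with a MISSING sentinel for an absent side, then classifies each joined row by which side is missing, so the classification performs no membership or lookup against d1/d2 at all.
import Mathlib
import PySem

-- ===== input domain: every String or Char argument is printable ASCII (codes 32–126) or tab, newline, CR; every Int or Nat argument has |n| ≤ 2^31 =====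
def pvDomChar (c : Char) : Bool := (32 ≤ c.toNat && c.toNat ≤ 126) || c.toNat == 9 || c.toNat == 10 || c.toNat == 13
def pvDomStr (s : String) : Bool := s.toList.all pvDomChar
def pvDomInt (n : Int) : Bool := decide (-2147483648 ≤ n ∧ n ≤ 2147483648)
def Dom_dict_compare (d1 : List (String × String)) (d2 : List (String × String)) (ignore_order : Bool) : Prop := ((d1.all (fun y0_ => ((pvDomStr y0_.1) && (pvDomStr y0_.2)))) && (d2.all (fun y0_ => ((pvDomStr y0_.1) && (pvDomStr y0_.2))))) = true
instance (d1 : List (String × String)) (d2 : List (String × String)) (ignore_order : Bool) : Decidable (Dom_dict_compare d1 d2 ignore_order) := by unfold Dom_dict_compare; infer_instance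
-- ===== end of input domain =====

-- ===== PORT A =====
-- A builds key sets, takes intersection/differences, and fills modified/same with
-- comprehensions over the intersection (the ignore_order reassignment of `modified`
-- is the if-branch). B builds a full outer join first and classifies its rows: an
-- alternative decomposition, same cost.
-- `d1[o]` for o in the intersection is rendered as `getD o ""` (the key is present, so exact).
def dict_compare (d1 : List (String × String)) (d2 : List (String × String)) (ignore_order : Bool) :
    List String × List String × (List (String × String × String)) × List String :=
  let dd1 := PySem.Dict.ofList d1
  let dd2 := PySem.Dict.ofList d2
  let d1_keys : PySem.Set String := PySem.Set.ofList dd1.keys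
  let d2_keys : PySem.Set String := PySem.Set.ofList dd2.keys
  let intersect_keys : PySem.Set String := PySem.Set.inter d1_keys d2_keys
  let added : PySem.Set String := PySem.Set.diff d1_keys d2_keys
  let removed : PySem.Set String := PySem.Set.diff d2_keys d1_keys
  let modified : List (String × String × String) :=
    if ignore_order then
      (intersect_keys.filter (fun o =>
          !(PySem.Set.equal (PySem.Set.ofList (dd1.getD o "").toList)
                            (PySem.Set.ofList (dd2.getD o "").toList)))).map
        (fun o => (o, dd1.getD o "", dd2.getD o ""))
    else
      (intersect_keys.filter (fun o => !(dd1.getD o "" == dd2.getD o ""))).map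
        (fun o => (o, dd1.getD o "", dd2.getD o ""))
  let same : PySem.Set String :=
    intersect_keys.filter (fun o => dd1.getD o "" == dd2.getD o "")
  (added, removed, modified, same)

-- ===== PORT B =====
-- Python's MISSING sentinel is Option's `none`; a joined row is (key, (d1-side, d2-side)).
-- one iteration of B's merge loop over d2.items():
-- merged[k] = (merged[k][0], v) if k in merged else (MISSING, v)
def pvMergeStep (m : PySem.Dict String (Option String × Option String)) (kv : String × String) :
    PySem.Dict String (Option String × Option String) :=
  if m.contains kv.1 then m.insert kv.1 ((m.getD kv.1 (none, none)).1, some kv.2)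
  else m.insert kv.1 (none, some kv.2)

-- one iteration of B's classification loop over the merged dict's items
def pvClass (io : Bool)
    (acc : List String × List String × List (String × String × String) × List String)
    (kv : String × Option String × Option String) :
    List String × List String × List (String × String × String) × List String :=
  match kv.2.2 with
  | none => (PySem.Set.add acc.1 kv.1, acc.2.1, acc.2.2.1, acc.2.2.2)   -- v2 is MISSING: added
  | some v2 =>
    match kv.2.1 with
    | none => (acc.1, PySem.Set.add acc.2.1 kv.1, acc.2.2.1, acc.2.2.2) -- v1 is MISSING: removed
    | some v1 =>
      (acc.1, acc.2.1,
       (if (if io then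
              !(PySem.Set.equal (PySem.Set.ofList v1.toList) (PySem.Set.ofList v2.toList))
            else !(v1 == v2))
        then acc.2.2.1 ++ [(kv.1, v1, v2)] else acc.2.2.1),
       (if v1 == v2 then PySem.Set.add acc.2.2.2 kv.1 else acc.2.2.2))

def dict_compare_alt (d1 : List (String × String)) (d2 : List (String × String)) (ignore_order : Bool) :
    List String × List String × (List (String × String × String)) × List String :=
  let dd1 := PySem.Dict.ofList d1
  let dd2 := PySem.Dict.ofList d2
  -- merged = {k: (v, MISSING) for k, v in d1.items()}  (d1's keys are already distinct)
  let merged0 : PySem.Dict String (Option String × Option String) :=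
    PySem.Dict.mk (dd1.items.map (fun kv => (kv.1, ((some kv.2 : Option String), (none : Option String)))))
  let merged := dd2.items.foldl pvMergeStep merged0
  merged.items.foldl (pvClass ignore_order) ([], [], [], [])

-- ===== PRECONDITION & SPEC =====
def Spec_dict_compare (d1 : List (String × String)) (d2 : List (String × String)) (ignore_order : Bool) (out : List String × List String × (List (String × String × String)) × List String) : Prop := out = dict_compare_alt d1 d2 ignore_order
instance (d1 : List (String × String)) (d2 : List (String × String)) (ignore_order : Bool) (out : List String × List String × (List (String × String × String)) × List String) : Decidable (Spec_dict_compare d1 d2 ignore_order out) := by unfold Spec_dict_compare; infer_instance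

-- ===== CLAIM (what is proved, stated in full; the proofs are below) =====
def Claim_equal_dict_compare : Prop := ∀ (d1 : List (String × String)) (d2 : List (String × String)) (ignore_order : Bool), Dom_dict_compare d1 d2 ignore_order → Spec_dict_compare d1 d2 ignore_order (dict_compare d1 d2 ignore_order)

-- ===== LEMMAS AND PROOFS =====

-- what one merge pass does to a d1 row: fills in the d2-side from the (remaining) d2 items
def pvRow (l : List (String × String)) (p : String × Option String × Option String) :
    String × Option String × Option String :=
  match (PySem.Dict.mk l).get? p.1 with
  | some v => (p.1, (p.2.1, some v))
  | none => p

-- `set(v1) != set(v2)` / `v1 != v2` as used on an intersection key (proof-side abbreviation)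
def pvChanged (dd2 : PySem.Dict String String) (io : Bool) (kv : String × String) : Bool :=
  if io then
    !(PySem.Set.equal (PySem.Set.ofList kv.2.toList)
                      (PySem.Set.ofList (dd2.getD kv.1 "").toList))
  else !(kv.2 == dd2.getD kv.1 "")

-- a Dict's key list contains k exactly when the Dict does
theorem pvContains_keys (d : PySem.Dict String String) (k : String) :
    d.keys.contains k = d.contains k := by
  exact List.contains_eq_mem k d.keys ▸ (PySem.Dict.contains_eq_decide_mem_keys d k).symm ▸ rfl

theorem pvRow_cons (kv : String × String) (rest : List (String × String))
    (p : String × Option String × Option String) :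
    pvRow (kv :: rest) p =
      if (kv.1 == p.1) = true then (p.1, (p.2.1, some kv.2)) else pvRow rest p := by
  obtain ⟨k, v⟩ := kv
  by_cases h : (k == p.1) = true
  · simp [pvRow, PySem.Dict.get?_mk_cons, h]
  · simp [pvRow, PySem.Dict.get?_mk_cons, h]

theorem pvRow_not_mem (l : List (String × String)) (p : String × Option String × Option String)
    (h : p.1 ∉ l.map Prod.fst) : pvRow l p = p := by
  have : (PySem.Dict.mk l).get? p.1 = none := by
    rw [PySem.Dict.get?_eq_none_iff_not_mem_keys]
    simpa [PySem.Dict.keys_mk] using h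
  simp [pvRow, this]

-- B's merge loop over d2 produces: the base rows with their d2-side filled in,
-- followed by the d2-only rows in d2 order
theorem pvMerged_fold :
    ∀ (l : List (String × String)) (m : PySem.Dict String (Option String × Option String)),
    (l.map Prod.fst).Nodup → m.keys.Nodup →
    (l.foldl pvMergeStep m).items
      = m.items.map (pvRow l)
        ++ (l.filter (fun kv => !m.contains kv.1)).map
             (fun kv => (kv.1, ((none : Option String), some kv.2))) := by
  intro l
  induction l with
  | nil =>
    intro m _ _
    have hid : ∀ p, pvRow [] p = p := fun p => rfl
    simp only [List.foldl_nil, List.filter_nil, List.map_nil, List.append_nil]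
    exact ((List.map_congr_left (fun p _ => hid p)).trans (List.map_id _)).symm
  | cons kv rest ih =>
    intro m hnd hm
    have hkrest : kv.1 ∉ rest.map Prod.fst := (List.nodup_cons.mp hnd).1
    have hnd' : (rest.map Prod.fst).Nodup := (List.nodup_cons.mp hnd).2
    simp only [List.foldl_cons, List.filter_cons, pvMergeStep]
    by_cases hc : m.contains kv.1 = true
    · rw [if_pos hc]
      rw [ih _ hnd' (PySem.Dict.nodup_keys_insert _ _ _ hm)]
      rw [PySem.Dict.items_insert_of_contains _ _ hc]
      have hfilter : rest.filter
            (fun p => !(m.insert kv.1 ((m.getD kv.1 (none, none)).1, some kv.2)).contains p.1)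
          = rest.filter (fun p => !m.contains p.1) := by
        apply List.filter_congr
        intro p hp
        have hne : (p.1 == kv.1) = false := by
          rw [beq_eq_false_iff_ne]
          intro h
          exact hkrest (h ▸ List.mem_map_of_mem (f := Prod.fst) hp)
        rw [PySem.Dict.contains_insert]
        simp_all
      rw [hfilter, List.map_map]
      simp only [hc, Bool.not_true, Bool.false_eq_true, if_false]
      congr 1
      apply List.map_congr_left
      intro p hp
      simp only [Function.comp_apply]
      by_cases hpk : (p.1 == kv.1) = true
      · have hpk' : p.1 = kv.1 := eq_of_beq hpk
        have hgd : m.getD kv.1 (none, none) = p.2 := by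
          rw [← hpk']
          exact PySem.Dict.getD_of_mem_items _ (by simpa using hp) hm (none, none)
        rw [if_pos hpk, hgd,
            pvRow_not_mem rest (kv.1, (p.2.1, some kv.2)) hkrest,
            pvRow_cons]
        simp [hpk']
      · rw [if_neg hpk, pvRow_cons, if_neg]
        intro h
        exact hpk (by simp [eq_of_beq h])
    · have hcf : m.contains kv.1 = false := by simpa using hc
      rw [if_neg hc]
      rw [ih _ hnd' (PySem.Dict.nodup_keys_insert _ _ _ hm)]
      rw [PySem.Dict.items_insert_of_not_contains _ _ hcf]
      have hfilter : rest.filter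
            (fun p => !(m.insert kv.1 ((none : Option String), some kv.2)).contains p.1)
          = rest.filter (fun p => !m.contains p.1) := by
        apply List.filter_congr
        intro p hp
        have hne : (p.1 == kv.1) = false := by
          rw [beq_eq_false_iff_ne]
          intro h
          exact hkrest (h ▸ List.mem_map_of_mem (f := Prod.fst) hp)
        rw [PySem.Dict.contains_insert]
        simp_all
      rw [hfilter, List.map_append]
      have hrow : [((kv.1 : String), ((none : Option String), (some kv.2 : Option String)))].map (pvRow rest)
          = [(kv.1, ((none : Option String), some kv.2))] := by
        simp [pvRow_not_mem rest (kv.1, ((none : Option String), some kv.2)) hkrest]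
      rw [hrow]
      have hmap : m.items.map (pvRow rest) = m.items.map (pvRow (kv :: rest)) := by
        apply List.map_congr_left
        intro p hp
        rw [pvRow_cons, if_neg]
        intro h
        have : kv.1 ∈ m.keys := (eq_of_beq h) ▸ PySem.Dict.mem_keys_of_mem_items _ hp
        have hck : m.contains kv.1 = true := by
          rw [PySem.Dict.contains_eq_decide_mem_keys]; simpa
        simp [hck] at hcf
      rw [hmap]
      simp [hcf, List.append_assoc]

-- the classification loop on d2-only rows only extends `removed`
theorem pvClass_d2only (io : Bool) :
    ∀ (l : List (String × String)) (a r : List String)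
      (m : List (String × String × String)) (s : List String),
    (l.map Prod.fst).Nodup → (∀ kv ∈ l, kv.1 ∉ r) →
    (l.map (fun kv => (kv.1, ((none : Option String), some kv.2)))).foldl (pvClass io) (a, r, m, s)
      = (a, r ++ l.map Prod.fst, m, s) := by
  intro l
  induction l with
  | nil => intro a r m s _ _; simp
  | cons kv rest ih =>
    intro a r m s hnd hdr
    simp only [List.map_cons, List.foldl_cons, pvClass]
    rw [PySem.Set.add_of_not_mem (hdr kv (by simp))]
    rw [ih a (r ++ [kv.1]) m s (List.nodup_cons.mp hnd).2 ?_]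
    · simp
    · intro p hp
      simp only [List.mem_append, List.mem_singleton]
      rintro (h | h)
      · exact hdr p (List.mem_cons_of_mem _ hp) h
      · exact (List.nodup_cons.mp hnd).1 (h ▸ List.mem_map_of_mem (f := Prod.fst) hp)

-- the classification loop on the joined d1 rows: three filters of d1's items
theorem pvClass_joined (dd2 : PySem.Dict String String) (io : Bool) :
    ∀ (l : List (String × String)) (a r : List String)
      (m : List (String × String × String)) (s : List String),
    (l.map Prod.fst).Nodup → (∀ kv ∈ l, kv.1 ∉ a) → (∀ kv ∈ l, kv.1 ∉ s) →
    (l.map (fun kv => (kv.1, (some kv.2, dd2.get? kv.1)))).foldl (pvClass io) (a, r, m, s)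
      = (a ++ (l.filter (fun kv => !dd2.contains kv.1)).map Prod.fst,
         r,
         m ++ (l.filter (fun kv => dd2.contains kv.1 && pvChanged dd2 io kv)).map
               (fun kv => (kv.1, kv.2, dd2.getD kv.1 "")),
         s ++ (l.filter (fun kv => dd2.contains kv.1 && (kv.2 == dd2.getD kv.1 ""))).map Prod.fst) := by
  intro l
  induction l with
  | nil => intro a r m s _ _ _; simp
  | cons kv rest ih =>
    intro a r m s hnd hda hds
    have hkrest : kv.1 ∉ rest.map Prod.fst := (List.nodup_cons.mp hnd).1
    have hnd' : (rest.map Prod.fst).Nodup := (List.nodup_cons.mp hnd).2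
    have hda' : ∀ p ∈ rest, p.1 ∉ a := fun p hp => hda p (List.mem_cons_of_mem _ hp)
    have hds' : ∀ p ∈ rest, p.1 ∉ s := fun p hp => hds p (List.mem_cons_of_mem _ hp)
    have hne : ∀ p ∈ rest, p.1 ≠ kv.1 := fun p hp h =>
      hkrest (h ▸ List.mem_map_of_mem (f := Prod.fst) hp)
    simp only [List.map_cons, List.foldl_cons, List.filter_cons]
    by_cases hc : dd2.contains kv.1 = true
    · obtain ⟨v, hv⟩ : ∃ v, dd2.get? kv.1 = some v := by
        have := (PySem.Dict.contains_eq_isSome_get? (d := dd2) (k := kv.1)) ▸ hc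
        exact Option.isSome_iff_exists.mp this
      have hgd : dd2.getD kv.1 "" = v := PySem.Dict.getD_of_get?_eq_some _ "" hv
      rw [hv]
      simp only [pvClass]
      have hchangeEq : (if io then
              !(PySem.Set.equal (PySem.Set.ofList kv.2.toList) (PySem.Set.ofList v.toList))
            else !(kv.2 == v)) = pvChanged dd2 io kv := by
        simp [pvChanged, hgd]
      by_cases he : (kv.2 == v) = true
      · have hes : (kv.2 == dd2.getD kv.1 "") = true := by rw [hgd]; exact he
        rw [if_pos he, PySem.Set.add_of_not_mem (hds kv (by simp))]
        by_cases hch : pvChanged dd2 io kv = true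
        · rw [hchangeEq, if_pos hch,
              ih a r (m ++ [(kv.1, kv.2, v)]) (s ++ [kv.1]) hnd' hda' ?_]
          · have hev : kv.2 = v := eq_of_beq he
            simp [hc, hch, hev, hgd]
          · intro p hp
            simp only [List.mem_append, List.mem_singleton]
            rintro (h | h)
            exacts [hds' p hp h, hne p hp h]
        · rw [hchangeEq, if_neg hch, ih a r m (s ++ [kv.1]) hnd' hda' ?_]
          · have hev : kv.2 = v := eq_of_beq he
            simp [hc, Bool.eq_false_iff.mpr hch, hgd, hev]
          · intro p hp
            simp only [List.mem_append, List.mem_singleton]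
            rintro (h | h)
            exacts [hds' p hp h, hne p hp h]
      · have hes : (kv.2 == dd2.getD kv.1 "") = false := by
          rw [hgd]; exact Bool.eq_false_iff.mpr he
        rw [if_neg he]
        by_cases hch : pvChanged dd2 io kv = true
        · rw [hchangeEq, if_pos hch, ih a r (m ++ [(kv.1, kv.2, v)]) s hnd' hda' hds']
          have hev : kv.2 ≠ v := by simpa using he
          simp [hc, hch, hev, hgd]
        · rw [hchangeEq, if_neg hch, ih a r m s hnd' hda' hds']
          have hev : kv.2 ≠ v := by simpa using he
          simp [hc, Bool.eq_false_iff.mpr hch, hgd, hev]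
    · have hcf : dd2.contains kv.1 = false := by simpa using hc
      have hv : dd2.get? kv.1 = none := by
        have := (PySem.Dict.contains_eq_isSome_get? (d := dd2) (k := kv.1)) ▸ hcf
        exact Option.not_isSome_iff_eq_none.mp (by simp [this])
      rw [hv]
      simp only [pvClass]
      rw [PySem.Set.add_of_not_mem (hda kv (by simp)),
          ih (a ++ [kv.1]) r m s hnd' ?_ hds']
      · simp [hcf]
      · intro p hp
        simp only [List.mem_append, List.mem_singleton]
        rintro (h | h)
        exacts [hda' p hp h, hne p hp h]

-- filling a d1 row from dd2's own items is a d2-lookup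
theorem pvRow_ofDict (dd2 : PySem.Dict String String) (k v1 : String) :
    pvRow dd2.items (k, (some v1, none)) = (k, (some v1, dd2.get? k)) := by
  have hmk : (PySem.Dict.mk dd2.items) = dd2 := rfl
  unfold pvRow
  rw [hmk]
  cases dd2.get? k <;> rfl

-- ===== VERDICT (by name: the statement is the Claim_ definition above) =====
theorem dict_compare_spec : Claim_equal_dict_compare := by
  intro d1 d2 io _
  unfold Spec_dict_compare
  have hnd1 : ((PySem.Dict.ofList d1).items.map Prod.fst).Nodup := PySem.Dict.nodup_keys_ofList d1
  have hnd2 : ((PySem.Dict.ofList d2).items.map Prod.fst).Nodup := PySem.Dict.nodup_keys_ofList d2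
  have hget1 : ∀ kv ∈ (PySem.Dict.ofList d1).items, (PySem.Dict.ofList d1).getD kv.1 "" = kv.2 :=
    fun kv h => PySem.Dict.getD_of_mem_items _ (by simpa using h) (PySem.Dict.nodup_keys_ofList d1) ""
  simp only [dict_compare, dict_compare_alt]
  have hitems : ∀ (L : List (String × (Option String × Option String))), (PySem.Dict.mk L).items = L :=
    fun _ => rfl
  have hnd0 : (PySem.Dict.mk ((PySem.Dict.ofList d1).items.map
      (fun kv => (kv.1, ((some kv.2 : Option String), (none : Option String)))))).keys.Nodup := by
    rw [PySem.Dict.keys_mk, List.map_map]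
    simpa using hnd1
  rw [pvMerged_fold _ _ hnd2 hnd0, hitems, List.map_map]
  have hmapB : ((PySem.Dict.ofList d1).items.map
        ((pvRow (PySem.Dict.ofList d2).items) ∘
          (fun kv => (kv.1, ((some kv.2 : Option String), (none : Option String))))))
      = (PySem.Dict.ofList d1).items.map
          (fun kv => (kv.1, ((some kv.2 : Option String), (PySem.Dict.ofList d2).get? kv.1))) := by
    apply List.map_congr_left
    intro kv _
    exact pvRow_ofDict _ kv.1 kv.2
  rw [hmapB]
  have hcont : (PySem.Dict.ofList d2).items.filter
        (fun kv => !(PySem.Dict.mk ((PySem.Dict.ofList d1).items.map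
          (fun kv => (kv.1, ((some kv.2 : Option String), (none : Option String)))))).contains kv.1)
      = (PySem.Dict.ofList d2).items.filter (fun kv => !(PySem.Dict.ofList d1).contains kv.1) := by
    apply List.filter_congr
    intro kv _
    congr 1
    simp only [PySem.Dict.contains, List.any_map]
    rfl
  rw [hcont, List.foldl_append]
  rw [pvClass_joined (PySem.Dict.ofList d2) io _ [] [] [] [] hnd1 (by simp) (by simp)]
  rw [pvClass_d2only io _ _ _ _ _ ?hnodup ?hdisj]
  case hnodup =>
    exact List.Nodup.sublist (List.Sublist.map _ List.filter_sublist) hnd2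
  case hdisj => simp
  rw [PySem.Set.ofList_eq_self_of_nodup _ (PySem.Dict.nodup_keys_ofList d1),
      PySem.Set.ofList_eq_self_of_nodup _ (PySem.Dict.nodup_keys_ofList d2)]
  simp only [PySem.Set.inter, PySem.Set.diff, PySem.Set.contains_eq_listContains, pvContains_keys,
             List.nil_append, Prod.mk.injEq]
  have hkeys1 : (PySem.Dict.ofList d1).keys = (PySem.Dict.ofList d1).items.map Prod.fst := rfl
  have hkeys2 : (PySem.Dict.ofList d2).keys = (PySem.Dict.ofList d2).items.map Prod.fst := rfl
  refine ⟨?_, ?_, ?_, ?_⟩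
  · -- added
    rw [hkeys1, List.filter_map]
    exact congrArg _ (List.filter_congr fun kv _ => rfl)
  · -- removed
    rw [hkeys2, List.filter_map]
    exact congrArg _ (List.filter_congr fun kv _ => rfl)
  · -- modified
    cases io
    · simp only [Bool.false_eq_true, if_false, pvChanged]
      rw [List.filter_filter, hkeys1, List.filter_map, List.map_map]
      rw [List.filter_congr (fun kv hmem => ?_), List.map_congr_left (fun kv hmem => ?_)]
      · simp only [Function.comp_apply]
        rw [hget1 kv (List.mem_of_mem_filter hmem)]
      · simp only [Function.comp_apply]
        rw [hget1 kv hmem, Bool.and_comm]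
    · simp only [if_true, pvChanged]
      rw [List.filter_filter, hkeys1, List.filter_map, List.map_map]
      rw [List.filter_congr (fun kv hmem => ?_), List.map_congr_left (fun kv hmem => ?_)]
      · simp only [Function.comp_apply]
        rw [hget1 kv (List.mem_of_mem_filter hmem)]
      · simp only [Function.comp_apply]
        rw [hget1 kv hmem, Bool.and_comm]
  · -- same
    rw [List.filter_filter, hkeys1, List.filter_map]
    rw [List.filter_congr (fun kv hmem => ?_)]
    simp only [Function.comp_apply]
    rw [hget1 kv hmem, Bool.and_comm]
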